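-- pv_equiv track=rewrite | github.com/taiduydinh/pypatternminer | pypatternminer/ihup.py | find_huis
-- ===== SOURCE A (Python) =====
-- def calculate_utility(itemset, transaction, utility):
--     return sum(utility[transaction.index(item)] for item in itemset if item in transaction)
--
-- def find_huis(transactions, candidates, min_util):
--     huis = []
--     for candidate in candidates:
--         total_utility = 0
--         for transaction, trans_utility, utility in transactions:
--             if set(candidate).issubset(set(transaction)):
--                 total_utility += calculate_utility(candidate, transaction, utility)
--         if total_utility >= min_util:
--             huis.append((candidate, total_utility))
--     return huis
-- ===== SOURCE B (Python) =====
-- def find_huis(transactions, candidates, min_util):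
--     # Inverted index: item -> {transaction_id: utility at the item's first occurrence}.
--     postings = {}
--     tid = 0
--     for transaction, _trans_utility, utility in transactions:
--         for item, value in zip(transaction, utility):
--             bucket = postings.setdefault(item, {})
--             if tid not in bucket:
--                 bucket[tid] = value
--         tid += 1
--     huis = []
--     for candidate in candidates:
--         if candidate:
--             base = postings.get(candidate[0], {})
--             rest = candidate[1:]
--             tids = [t for t in base
--                     if all(t in postings.get(item, {}) for item in rest)]
--             total = sum(sum(postings.get(item, {}).get(t, 0) for t in tids)
--                         for item in candidate)
--         else:
--             total = 0
--         if total >= min_util: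
--             huis.append((candidate, total))
--     return huis
-- ===== Notes on version B (the rewrite author's own statement) =====
-- stated objective: alternative
-- what changed: B builds an inverted index (item -> posting map from transaction id to the utility of the item's first occurrence) in one pass over the transactions, then answers each candidate by intersecting the posting lists of its items (starting from the first item's tids) and summing posting values over the intersection with multiplicity, so A's per-(candidate,transaction) set constructions, subset tests and repeated transaction.index scans disappear.
-- outside the precondition, e.g. on find_huis([([1], 2, [])], [[1]], 0): A raises IndexError, B returns [([1], 0)]
import Mathlib
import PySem

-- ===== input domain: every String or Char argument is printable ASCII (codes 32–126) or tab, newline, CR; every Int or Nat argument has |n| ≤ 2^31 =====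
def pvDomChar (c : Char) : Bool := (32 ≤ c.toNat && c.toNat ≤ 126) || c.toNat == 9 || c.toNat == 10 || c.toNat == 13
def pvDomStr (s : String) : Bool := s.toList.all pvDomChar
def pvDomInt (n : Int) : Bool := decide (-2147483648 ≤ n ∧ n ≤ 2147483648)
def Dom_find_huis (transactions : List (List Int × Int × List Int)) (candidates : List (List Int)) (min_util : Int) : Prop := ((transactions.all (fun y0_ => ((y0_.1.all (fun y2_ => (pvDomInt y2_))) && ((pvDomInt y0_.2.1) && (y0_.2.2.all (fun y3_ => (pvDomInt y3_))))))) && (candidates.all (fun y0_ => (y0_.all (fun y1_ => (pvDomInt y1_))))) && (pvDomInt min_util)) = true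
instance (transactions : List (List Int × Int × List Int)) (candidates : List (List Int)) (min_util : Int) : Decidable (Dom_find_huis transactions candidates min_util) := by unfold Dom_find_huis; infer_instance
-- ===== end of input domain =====

-- B replaces A's per-(candidate, transaction) subset tests and repeated transaction.index
-- scans by an inverted index (item -> posting map tid -> first-occurrence utility) built
-- once, with candidates answered by intersecting their items' posting lists
-- (objective: alternative algorithm).

-- ===== PORT A =====
-- sum(utility[transaction.index(item)] for item in itemset if item in transaction)
def calculate_utility (itemset transaction utility : List Int) : Int :=
  itemset.foldl (fun acc item =>
    if transaction.contains item then
      acc + ((PySem.List.index? transaction item).bind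
               (fun i => PySem.List.pyGet? utility (Int.ofNat i))).getD 0
    else acc) 0

def find_huis (transactions : List (List Int × Int × List Int)) (candidates : List (List Int)) (min_util : Int) : List (List Int × Int) :=
  candidates.foldl (fun huis candidate =>
    let total_utility : Int := transactions.foldl (fun tot tr =>
      if PySem.Set.issubset (PySem.Set.ofList candidate) (PySem.Set.ofList tr.1)
      then tot + calculate_utility candidate tr.1 tr.2.2
      else tot) 0
    if min_util ≤ total_utility then huis ++ [(candidate, total_utility)] else huis) []

-- ===== PORT B =====
-- bucket = postings.setdefault(item, {}); if tid not in bucket: bucket[tid] = value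
def pvStep (tid : Int) (P : PySem.Dict Int (PySem.Dict Int Int)) (p : Int × Int) : PySem.Dict Int (PySem.Dict Int Int) :=
  let bucket := P.getD p.1 PySem.Dict.empty
  if bucket.contains tid then P else P.insert p.1 (bucket.insert tid p.2)

-- for item, value in zip(transaction, utility): …
def pvAddTrans (tid : Int) (tr : List Int × Int × List Int) (P : PySem.Dict Int (PySem.Dict Int Int)) : PySem.Dict Int (PySem.Dict Int Int) :=
  (tr.1.zip tr.2.2).foldl (pvStep tid) P

-- tid = 0; for transaction, _tu, utility in transactions: …; tid += 1
def pvBuild (tid : Int) (ts : List (List Int × Int × List Int)) (P : PySem.Dict Int (PySem.Dict Int Int)) : PySem.Dict Int (PySem.Dict Int Int) :=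
  match ts with
  | [] => P
  | tr :: rest => pvBuild (tid + 1) rest (pvAddTrans tid tr P)

def find_huis_alt (transactions : List (List Int × Int × List Int)) (candidates : List (List Int)) (min_util : Int) : List (List Int × Int) :=
  let postings := pvBuild 0 transactions PySem.Dict.empty
  candidates.foldl (fun huis candidate =>
    let total : Int :=
      match candidate with
      | [] => 0
      | c0 :: rest =>
        let base := postings.getD c0 PySem.Dict.empty
        let tids := base.keys.filter (fun t =>
          rest.all (fun item => (postings.getD item PySem.Dict.empty).contains t))
        (candidate.map (fun item =>
          (tids.map (fun t => (postings.getD item PySem.Dict.empty).getD t 0)).sum)).sum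
    if min_util ≤ total then huis ++ [(candidate, total)] else huis) []

-- ===== PRECONDITION & SPEC =====
-- Pre_ is exactly the inputs on which A returns normally: A raises IndexError iff some
-- candidate is contained in some transaction while one of its items first occurs at a
-- position past the end of that transaction's utility list.
def Pre_find_huis (transactions : List (List Int × Int × List Int)) (candidates : List (List Int)) (min_util : Int) : Prop :=
  ∀ c ∈ candidates, ∀ tr ∈ transactions,
    (∀ x ∈ c, x ∈ tr.1) → ∀ x ∈ c, tr.1.idxOf x < tr.2.2.length
instance (transactions : List (List Int × Int × List Int)) (candidates : List (List Int)) (min_util : Int) : Decidable (Pre_find_huis transactions candidates min_util) := by unfold Pre_find_huis; infer_instance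

def pvWitness_find_huis : (List (List Int × Int × List Int)) × List (List Int) × Int :=
  ([([1, 2], 3, [4, 5]), ([2], 1, [7])], [[1], [2], []], 0)

def Spec_find_huis (transactions : List (List Int × Int × List Int)) (candidates : List (List Int)) (min_util : Int) (out : List (List Int × Int)) : Prop := out = find_huis_alt transactions candidates min_util
instance (transactions : List (List Int × Int × List Int)) (candidates : List (List Int)) (min_util : Int) (out : List (List Int × Int)) : Decidable (Spec_find_huis transactions candidates min_util out) := by unfold Spec_find_huis; infer_instance

-- ===== CLAIM (what is proved, stated in full; the proofs are below) =====
def Claim_equal_find_huis : Prop := ∀ (transactions : List (List Int × Int × List Int)) (candidates : List (List Int)) (min_util : Int), Dom_find_huis transactions candidates min_util → Pre_find_huis transactions candidates min_util → Spec_find_huis transactions candidates min_util (find_huis transactions candidates min_util)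

-- ===== LEMMAS AND PROOFS =====

-- per-transaction contribution of one candidate, the common reference point of both ports
def pvContrib (c : List Int) (tr : List Int × Int × List Int) : Int :=
  if c.all (fun x => tr.1.contains x)
  then (c.map (fun x => ((PySem.List.index? tr.1 x).bind
         (fun i => PySem.List.pyGet? tr.2.2 (Int.ofNat i))).getD 0)).sum
  else 0

-- first-occurrence map of one zipped transaction, the reference value of a posting bucket
def pvFirst (l : List (Int × Int)) (x : Int) : Option Int :=
  (l.find? (fun p => p.1 == x)).map Prod.snd

theorem index?_mem_eq (t : List Int) (x : Int) (h : x ∈ t) :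
    PySem.List.index? t x = some (t.idxOf x) := by
  induction t with
  | nil => cases h
  | cons a t ih =>
    by_cases hax : a = x
    · subst hax
      rw [PySem.List.index?_cons_self, List.idxOf_cons_self]
    · rw [PySem.List.index?_cons_of_ne t hax,
          ih (by cases h with | head => exact absurd rfl hax | tail _ h' => exact h'),
          List.idxOf_cons_ne t hax]
      rfl

theorem pvFirst_zip (t : List Int) : ∀ (u : List Int) (x : Int),
    pvFirst (t.zip u) x = (PySem.List.index? t x).bind (fun i => u[i]?) := by
  induction t with
  | nil => intro u x; simp [pvFirst, PySem.List.index?]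
  | cons a t ih =>
    intro u x
    cases u with
    | nil =>
      rw [List.zip_nil_right]
      cases h : PySem.List.index? (a :: t) x <;> simp [pvFirst, h]
    | cons v u =>
      rw [List.zip_cons_cons]
      by_cases hax : a = x
      · subst hax
        rw [PySem.List.index?_cons_self]
        simp [pvFirst]
      · rw [PySem.List.index?_cons_of_ne t hax]
        have : pvFirst ((a, v) :: t.zip u) x = pvFirst (t.zip u) x := by
          simp only [pvFirst, List.find?, beq_eq_false_iff_ne.mpr hax]
        rw [this, ih u x]
        cases h : PySem.List.index? t x with
        | none => simp [h]
        | some i => simp [h]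

-- inner fold leaves every bucket untouched at any other tid
theorem pvStep_get?_ne (l : List (Int × Int)) : ∀ (P : PySem.Dict Int (PySem.Dict Int Int)) (x tid tid' : Int), tid' ≠ tid →
    ((l.foldl (pvStep tid) P).getD x PySem.Dict.empty).get? tid'
    = (P.getD x PySem.Dict.empty).get? tid' := by
  induction l with
  | nil => intro P x tid tid' h; rfl
  | cons p l ih =>
    intro P x tid tid' h
    rw [List.foldl_cons]
    show ((l.foldl (pvStep tid) (pvStep tid P p)).getD x PySem.Dict.empty).get? tid' = _
    rw [ih (pvStep tid P p) x tid tid' h]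
    unfold pvStep
    by_cases hc : (P.getD p.1 PySem.Dict.empty).contains tid
    · rw [if_pos hc]
    · rw [if_neg hc]
      by_cases hx : x = p.1
      · subst hx
        rw [PySem.Dict.getD_insert_self, PySem.Dict.get?_insert_of_ne _ _ h]
      · rw [PySem.Dict.getD_insert_of_ne _ _ _ hx]

-- inner fold writes exactly the first-occurrence values at its own tid
theorem pvStep_get?_self (l : List (Int × Int)) : ∀ (P : PySem.Dict Int (PySem.Dict Int Int)) (x tid : Int),
    ((l.foldl (pvStep tid) P).getD x PySem.Dict.empty).get? tid
    = if (P.getD x PySem.Dict.empty).contains tid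
      then (P.getD x PySem.Dict.empty).get? tid
      else pvFirst l x := by
  induction l with
  | nil =>
    intro P x tid
    by_cases hc : (P.getD x PySem.Dict.empty).contains tid
    · simp [hc]
    · simp only [List.foldl_nil, if_neg hc, pvFirst, List.find?]
      rw [(PySem.Dict.get?_eq_none_iff_contains _ tid).mpr (by simpa using hc)]
      rfl
  | cons p l ih =>
    intro P x tid
    rw [List.foldl_cons]
    show ((l.foldl (pvStep tid) (pvStep tid P p)).getD x PySem.Dict.empty).get? tid = _
    rw [ih (pvStep tid P p) x tid]
    unfold pvStep
    by_cases hc : (P.getD p.1 PySem.Dict.empty).contains tid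
    · rw [if_pos hc]
      by_cases hx : x = p.1
      · subst hx
        rw [if_pos hc, if_pos hc]
      · rw [show pvFirst (p :: l) x = pvFirst l x by
          simp only [pvFirst, List.find?, beq_eq_false_iff_ne.mpr (fun h => hx h.symm)]]
    · rw [if_neg hc]
      by_cases hx : x = p.1
      · subst hx
        rw [PySem.Dict.getD_insert_self]
        rw [if_pos (by simp [PySem.Dict.contains_insert]),
            PySem.Dict.get?_insert_self, if_neg hc]
        simp [pvFirst, List.find?]
      · rw [PySem.Dict.getD_insert_of_ne _ _ _ hx]
        have hfind : pvFirst (p :: l) x = pvFirst l x := by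
          simp only [pvFirst, List.find?, beq_eq_false_iff_ne.mpr (fun h => hx h.symm)]
        rw [hfind]

-- characterisation of the whole inverted index
theorem pvBuild_get? (ts : List (List Int × Int × List Int)) : ∀ (k : Int) (P : PySem.Dict Int (PySem.Dict Int Int)) (x t : Int), 0 ≤ k →
    (∀ y t', ¬ (0 ≤ t' ∧ t' < k) → ((P.getD y PySem.Dict.empty).get? t') = none) →
    ((pvBuild k ts P).getD x PySem.Dict.empty).get? t
    = if 0 ≤ t ∧ k ≤ t
      then (ts[(t - k).toNat]?).bind (fun tr => pvFirst (tr.1.zip tr.2.2) x)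
      else (P.getD x PySem.Dict.empty).get? t := by
  induction ts with
  | nil =>
    intro k P x t hk hinv
    by_cases h : 0 ≤ t ∧ k ≤ t
    · rw [if_pos h]
      simp only [pvBuild, List.getElem?_nil, Option.bind_none]
      exact hinv x t (by omega)
    · rw [if_neg h]; rfl
  | cons tr ts ih =>
    intro k P x t hk hinv
    show ((pvBuild (k + 1) ts (pvAddTrans k tr P)).getD x PySem.Dict.empty).get? t = _
    have hinv' : ∀ y t', ¬ (0 ≤ t' ∧ t' < k + 1) →
        (((pvAddTrans k tr P).getD y PySem.Dict.empty).get? t') = none := by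
      intro y t' h
      unfold pvAddTrans
      rw [pvStep_get?_ne _ _ _ _ _ (by omega : t' ≠ k)]
      exact hinv y t' (by omega)
    rw [ih (k + 1) (pvAddTrans k tr P) x t (by omega) hinv']
    by_cases h1 : 0 ≤ t ∧ k + 1 ≤ t
    · rw [if_pos h1, if_pos ⟨h1.1, by omega⟩]
      have : (t - k).toNat = (t - (k + 1)).toNat + 1 := by omega
      rw [this, List.getElem?_cons_succ]
    · rw [if_neg h1]
      by_cases h2 : t = k
      · subst h2
        rw [if_pos ⟨hk, le_refl _⟩]
        unfold pvAddTrans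
        rw [pvStep_get?_self]
        have hn : (P.getD x PySem.Dict.empty).get? t = none := hinv x t (by omega)
        have hcf : (P.getD x PySem.Dict.empty).contains t = false := by
          rw [PySem.Dict.contains_eq_isSome_get?, hn]; rfl
        rw [if_neg (by simp [hcf])]
        simp
      · rw [if_neg (by omega)]
        unfold pvAddTrans
        rw [pvStep_get?_ne _ _ _ _ _ (by omega : t ≠ k)]

theorem pvBuild_nodup (ts : List (List Int × Int × List Int)) : ∀ (k : Int) (P : PySem.Dict Int (PySem.Dict Int Int)) (x : Int),
    (∀ y, ((P.getD y PySem.Dict.empty)).keys.Nodup) →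
    ((pvBuild k ts P).getD x PySem.Dict.empty).keys.Nodup := by
  induction ts with
  | nil => intro k P x h; exact h x
  | cons tr ts ih =>
    intro k P x h
    refine ih (k + 1) (pvAddTrans k tr P) x ?_
    intro y
    unfold pvAddTrans
    generalize tr.1.zip tr.2.2 = l
    induction l generalizing P with
    | nil => exact h y
    | cons p l ihl =>
      rw [List.foldl_cons]
      refine ihl (pvStep k P p) ?_
      intro z
      unfold pvStep
      by_cases hc : (P.getD p.1 PySem.Dict.empty).contains k
      · rw [if_pos hc]; exact h z
      · rw [if_neg hc]
        by_cases hz : z = p.1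
        · subst hz
          rw [PySem.Dict.getD_insert_self]
          exact PySem.Dict.nodup_keys_insert _ _ _ (h p.1)
        · rw [PySem.Dict.getD_insert_of_ne _ _ _ hz]; exact h z

-- the bucket of one item in the fully built inverted index
def pvBkt (ts : List (List Int × Int × List Int)) (x : Int) : PySem.Dict Int Int :=
  (pvBuild 0 ts PySem.Dict.empty).getD x PySem.Dict.empty

theorem pvBkt_get? (ts : List (List Int × Int × List Int)) (x t : Int) :
    (pvBkt ts x).get? t
    = if 0 ≤ t then (ts[t.toNat]?).bind (fun tr => pvFirst (tr.1.zip tr.2.2) x) else none := by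
  unfold pvBkt
  rw [pvBuild_get? ts 0 PySem.Dict.empty x t le_rfl
        (by intro y t' _; simp [PySem.Dict.getD_empty, PySem.Dict.get?_empty])]
  by_cases h : 0 ≤ t
  · rw [if_pos ⟨h, h⟩, if_pos h]
    norm_num
  · rw [if_neg (by omega), if_neg h]
    simp [PySem.Dict.getD_empty, PySem.Dict.get?_empty]

theorem pvBkt_nodup (ts : List (List Int × Int × List Int)) (x : Int) :
    (pvBkt ts x).keys.Nodup := by
  unfold pvBkt
  exact pvBuild_nodup ts 0 PySem.Dict.empty x
    (by intro y; simp [PySem.Dict.getD_empty, PySem.Dict.keys_empty])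

theorem pvBkt_contains_bound (ts : List (List Int × Int × List Int)) (x t : Int)
    (h : (pvBkt ts x).contains t = true) : 0 ≤ t ∧ t.toNat < ts.length := by
  rw [PySem.Dict.contains_eq_isSome_get?, pvBkt_get?] at h
  by_cases h0 : 0 ≤ t
  · refine ⟨h0, ?_⟩
    by_contra hlen
    rw [if_pos h0, List.getElem?_eq_none (by omega)] at h
    simp at h
  · rw [if_neg h0] at h; simp at h

theorem pvBkt_get?_nat (ts : List (List Int × Int × List Int)) (x : Int) (j : Nat)
    (h : j < ts.length) :
    (pvBkt ts x).get? (Int.ofNat j)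
    = (PySem.List.index? ts[j].1 x).bind (fun i => ts[j].2.2[i]?) := by
  rw [pvBkt_get?, if_pos (show (0:Int) ≤ Int.ofNat j from Int.natCast_nonneg j),
      show (Int.ofNat j).toNat = j from rfl,
      List.getElem?_eq_getElem h]
  simp only [Option.bind_some]
  exact pvFirst_zip ts[j].1 ts[j].2.2 x

-- sums commute between the two iteration orders
theorem pvSum_map_add {β : Type} (l : List β) (g h : β → Int) :
    (l.map (fun b => g b + h b)).sum = (l.map g).sum + (l.map h).sum := by
  induction l with
  | nil => simp
  | cons b l ih => simp only [List.map_cons, List.sum_cons, ih]; ring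

theorem pvSum_comm {α β : Type} (l1 : List α) (l2 : List β) (f : α → β → Int) :
    (l1.map (fun a => (l2.map (f a)).sum)).sum
    = (l2.map (fun b => (l1.map (fun a => f a b)).sum)).sum := by
  induction l1 with
  | nil => simp
  | cons a l1 ih =>
    simp only [List.map_cons, List.sum_cons, ih]
    rw [pvSum_map_add l2 (f a) (fun b => (l1.map (fun a => f a b)).sum)]

theorem pvSum_filter {α : Type} (M : List α) (p : α → Bool) (f : α → Int) :
    ((M.filter p).map f).sum = (M.map (fun t => if p t then f t else 0)).sum := by
  induction M with
  | nil => rfl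
  | cons a M ih =>
    by_cases h : p a
    · simp [h, ih]
    · simp [h, ih]

theorem pvSum_range {α : Type} (ts : List α) : ∀ (G : Nat → Int) (f : α → Int),
    (∀ (j : Nat) (h : j < ts.length), G j = f ts[j]) →
    ((List.range ts.length).map G).sum = (ts.map f).sum := by
  induction ts with
  | nil => intro G f _; rfl
  | cons a ts ih =>
    intro G f h
    rw [List.length_cons, List.range_succ_eq_map]
    simp only [List.map_cons, List.sum_cons, List.map_map]
    rw [h 0 (by simp), ih (G ∘ Nat.succ) f
          (by intro j hj; exact h (j + 1) (by simpa using Nat.succ_lt_succ hj))]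
    rfl

-- the candidate's total in B equals the sum of per-transaction contributions
theorem B_total (ts : List (List Int × Int × List Int)) (c0 : Int) (rest : List Int)
    (hpre : ∀ tr ∈ ts, (∀ x ∈ c0 :: rest, x ∈ tr.1) →
      ∀ x ∈ c0 :: rest, tr.1.idxOf x < tr.2.2.length) :
    ((c0 :: rest).map (fun item =>
      (((pvBkt ts c0).keys.filter (fun t =>
          rest.all (fun item => (pvBkt ts item).contains t))).map
        (fun t => (pvBkt ts item).getD t 0)).sum)).sum
    = (ts.map (pvContrib (c0 :: rest))).sum := by
  have hperm : ((pvBkt ts c0).keys.filter (fun t =>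
        rest.all (fun item => (pvBkt ts item).contains t))).Perm
      ((((List.range ts.length).map (fun j => (Int.ofNat j))).filter (fun t =>
        (c0 :: rest).all (fun x => (pvBkt ts x).contains t)))) := by
    rw [List.perm_ext_iff_of_nodup
          ((pvBkt_nodup ts c0).filter _)
          ((List.nodup_range.map (fun a b hab => Int.ofNat.inj hab)).filter _)]
    intro t
    simp only [List.mem_filter, List.mem_map, List.mem_range, List.all_cons, Bool.and_eq_true]
    constructor
    · rintro ⟨hk, hr⟩
      have hc0 : (pvBkt ts c0).contains t = true :=
        (PySem.Dict.contains_iff_mem_keys _ _).mpr hk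
      have hb := pvBkt_contains_bound ts c0 t hc0
      exact ⟨⟨t.toNat, hb.2, by simpa using Int.toNat_of_nonneg hb.1⟩, hc0, hr⟩
    · rintro ⟨_, hc0, hr⟩
      exact ⟨(PySem.Dict.contains_iff_mem_keys _ _).mp hc0, hr⟩
  rw [List.map_congr_left (fun item (_ : item ∈ c0 :: rest) =>
        ((hperm.map (fun t => (pvBkt ts item).getD t 0)).sum_eq))]
  rw [pvSum_comm (c0 :: rest) _ (fun item t => (pvBkt ts item).getD t 0)]
  rw [pvSum_filter, List.map_map]
  refine pvSum_range ts _ (pvContrib (c0 :: rest)) ?_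
  intro j hj
  have hj? : ts[j]? = some ts[j] := List.getElem?_eq_getElem hj
  simp only [Function.comp]
  by_cases hall : (c0 :: rest).all (fun x => ts[j].1.contains x)
  · -- candidate contained in this transaction
    have hmem : ∀ x ∈ c0 :: rest, x ∈ ts[j].1 := by
      intro x hx
      simpa using List.all_eq_true.mp hall x hx
    have hidx := hpre ts[j] (List.getElem_mem hj) hmem
    have hget : ∀ x ∈ c0 :: rest,
        (pvBkt ts x).get? (Int.ofNat j) = ts[j].2.2[ts[j].1.idxOf x]? := by
      intro x hx
      rw [pvBkt_get?_nat ts x j hj, index?_mem_eq _ _ (hmem x hx)]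
      rfl
    have hcontains : ((c0 :: rest).all (fun x => (pvBkt ts x).contains (Int.ofNat j))) = true := by
      rw [List.all_eq_true]
      intro x hx
      rw [PySem.Dict.contains_eq_isSome_get?, hget x hx,
          List.getElem?_eq_getElem (hidx x hx)]
      rfl
    rw [if_pos hcontains]
    unfold pvContrib
    rw [if_pos hall]
    congr 1
    refine List.map_congr_left ?_
    intro x hx
    rw [PySem.Dict.getD_eq_get?_getD, hget x hx, index?_mem_eq _ _ (hmem x hx)]
    simp [List.getElem?_eq_getElem (hidx x hx)]
  · -- some item is missing from this transaction
    obtain ⟨x0, hx0, hx0f⟩ := List.all_eq_false.mp (Bool.not_eq_true _ ▸ hall)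
    have hx0mem : x0 ∉ ts[j].1 := by simpa using hx0f
    have hcf : ((c0 :: rest).all (fun x => (pvBkt ts x).contains (Int.ofNat j))) = false := by
      rw [List.all_eq_false]
      refine ⟨x0, hx0, ?_⟩
      rw [PySem.Dict.contains_eq_isSome_get?, pvBkt_get?_nat ts x0 j hj,
          (PySem.List.index?_eq_none_iff _ _).mpr hx0mem]
      simp
    rw [hcf]
    unfold pvContrib
    rw [if_neg hall]
    simp

-- A's per-candidate total also equals that sum (via the same reference pvContrib)
theorem contrib_A (tr : List Int × Int × List Int) (c : List Int) :
    (if PySem.Set.issubset (PySem.Set.ofList c) (PySem.Set.ofList tr.1)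
     then calculate_utility c tr.1 tr.2.2
     else 0) = pvContrib c tr := by
  have hsub : PySem.Set.issubset (PySem.Set.ofList c) (PySem.Set.ofList tr.1)
      = c.all (fun x => tr.1.contains x) := by
    rw [Bool.eq_iff_iff]
    simp [PySem.Set.issubset_iff, PySem.Set.mem_ofList, List.all_eq_true]
  rw [hsub]
  unfold pvContrib
  by_cases hall : c.all (fun x => tr.1.contains x)
  · rw [if_pos hall, if_pos hall]
    unfold calculate_utility
    rw [PySem.List.foldl_congr_mem c _
          (fun acc x => acc + ((PySem.List.index? tr.1 x).bind
            (fun i => PySem.List.pyGet? tr.2.2 (Int.ofNat i))).getD 0) 0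
          (by
            intro acc x hx
            have hxin : tr.1.contains x = true := by
              have := List.all_eq_true.mp hall x hx
              simpa using this
            rw [if_pos hxin]),
        PySem.List.foldl_add]
    simp
  · rw [if_neg hall, if_neg hall]

theorem A_total (transactions : List (List Int × Int × List Int)) (c : List Int) :
    transactions.foldl (fun tot tr =>
      if PySem.Set.issubset (PySem.Set.ofList c) (PySem.Set.ofList tr.1)
      then tot + calculate_utility c tr.1 tr.2.2
      else tot) 0
    = (transactions.map (pvContrib c)).sum := by
  rw [PySem.List.foldl_congr_mem transactions _
        (fun tot tr => tot + pvContrib c tr) 0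
        (by
          intro tot tr _
          show _ = tot + pvContrib c tr
          rw [← contrib_A tr c]
          split <;> simp),
      PySem.List.foldl_add]
  simp

-- ===== VERDICT (by name: the statement is the Claim_ definition above) =====
theorem find_huis_spec : Claim_equal_find_huis := by
  intro transactions candidates min_util _hdom hpre
  unfold Spec_find_huis find_huis find_huis_alt
  refine PySem.List.foldl_congr_mem candidates _ _ [] ?_
  intro acc c hc
  cases c with
  | nil =>
    show (if min_util ≤ transactions.foldl (fun tot tr =>
        if PySem.Set.issubset (PySem.Set.ofList []) (PySem.Set.ofList tr.1)
        then tot + calculate_utility [] tr.1 tr.2.2 else tot) 0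
      then acc ++ [(([] : List Int), transactions.foldl (fun tot tr =>
        if PySem.Set.issubset (PySem.Set.ofList []) (PySem.Set.ofList tr.1)
        then tot + calculate_utility [] tr.1 tr.2.2 else tot) 0)] else acc)
      = (if min_util ≤ (0 : Int) then acc ++ [(([] : List Int), (0 : Int))] else acc)
    rw [A_total,
        List.map_congr_left (fun tr _ => (by simp [pvContrib] : pvContrib ([] : List Int) tr = 0))]
    simp
  | cons c0 rest =>
    have hB := B_total transactions c0 rest (fun tr htr => hpre (c0 :: rest) hc tr htr)
    show (if min_util ≤ transactions.foldl (fun tot tr =>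
        if PySem.Set.issubset (PySem.Set.ofList (c0 :: rest)) (PySem.Set.ofList tr.1)
        then tot + calculate_utility (c0 :: rest) tr.1 tr.2.2 else tot) 0
      then acc ++ [((c0 :: rest), transactions.foldl (fun tot tr =>
        if PySem.Set.issubset (PySem.Set.ofList (c0 :: rest)) (PySem.Set.ofList tr.1)
        then tot + calculate_utility (c0 :: rest) tr.1 tr.2.2 else tot) 0)] else acc)
      = (if min_util ≤ ((c0 :: rest).map (fun item =>
            (((pvBkt transactions c0).keys.filter (fun t =>
              rest.all (fun item => (pvBkt transactions item).contains t))).map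
              (fun t => (pvBkt transactions item).getD t 0)).sum)).sum
        then acc ++ [((c0 :: rest), ((c0 :: rest).map (fun item =>
            (((pvBkt transactions c0).keys.filter (fun t =>
              rest.all (fun item => (pvBkt transactions item).contains t))).map
              (fun t => (pvBkt transactions item).getD t 0)).sum)).sum)] else acc)
    rw [A_total, hB]
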